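-- pv_equiv track=rewrite | github.com/lv300-max/collatz-certificate-workbench | collatz_certificate_final/excursion_quotient_analyzer.py | v2_sequence_from_parity_word
-- ===== SOURCE A (Python) =====
-- def v2_sequence_from_parity_word(word):
--     seq = []
--     pending_odd = False
--     zeros = 0
--     for ch in word:
--         if ch == "1":
--             if pending_odd:
--                 seq.append(zeros)
--             pending_odd = True
--             zeros = 0
--         elif pending_odd:
--             zeros += 1
--     if pending_odd:
--         seq.append(zeros)
--     return seq
-- ===== SOURCE B (Python) =====
-- def v2_sequence_from_parity_word(word):
--     return [len(seg) for seg in word.split("1")[1:]]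
-- ===== Notes on version B (the rewrite author's own statement) =====
-- stated objective: simpler
-- what changed: Replaces the character-by-character state machine (pending flag, zero counter, conditional appends) with a single split('1') whose segments after the first are exactly the runs between/after '1's, so B is a one-liner over tokens instead of characters.
import Mathlib
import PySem

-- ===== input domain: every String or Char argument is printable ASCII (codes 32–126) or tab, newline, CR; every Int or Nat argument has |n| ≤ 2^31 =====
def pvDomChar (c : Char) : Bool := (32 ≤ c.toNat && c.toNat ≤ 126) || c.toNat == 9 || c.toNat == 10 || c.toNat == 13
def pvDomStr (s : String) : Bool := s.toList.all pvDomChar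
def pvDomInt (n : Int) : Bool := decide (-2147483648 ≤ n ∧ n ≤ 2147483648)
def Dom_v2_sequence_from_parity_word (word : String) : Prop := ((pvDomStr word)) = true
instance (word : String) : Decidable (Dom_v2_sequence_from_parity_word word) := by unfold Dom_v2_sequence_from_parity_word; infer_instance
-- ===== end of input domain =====

-- B replaces A's character-level state machine by one split("1"): equivalence of return values.
-- ===== PORT A =====
-- one step of A's for-loop; state = (seq, pending_odd, zeros)
def pvStepA (st : List Int × Bool × Int) (ch : Char) : List Int × Bool × Int :=
  if ch = '1' then
    ((if st.2.1 then st.1 ++ [st.2.2] else st.1), true, 0)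
  else if st.2.1 then (st.1, st.2.1, st.2.2 + 1)
  else st

-- the trailing 'if pending_odd: seq.append(zeros)' of A
def pvFinishA (st : List Int × Bool × Int) : List Int :=
  if st.2.1 then st.1 ++ [st.2.2] else st.1

def v2_sequence_from_parity_word (word : String) : List Int :=
  pvFinishA (word.toList.foldl pvStepA ([], false, 0))

-- ===== PORT B =====
-- word.split("1")[1:], then len of each segment ([1:] on a list is exactly List.drop 1)
def v2_sequence_from_parity_word_alt (word : String) : List Int :=
  ((PySem.Chars.splitOn word.toList ['1']).drop 1).map (fun seg => (seg.length : Int))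

-- ===== PRECONDITION & SPEC =====
def Spec_v2_sequence_from_parity_word (word : String) (out : List Int) : Prop := out = v2_sequence_from_parity_word_alt word
instance (word : String) (out : List Int) : Decidable (Spec_v2_sequence_from_parity_word word out) := by unfold Spec_v2_sequence_from_parity_word; infer_instance

-- ===== CLAIM (what is proved, stated in full; the proofs are below) =====
def Claim_equal_v2_sequence_from_parity_word : Prop := ∀ (word : String), Dom_v2_sequence_from_parity_word word → Spec_v2_sequence_from_parity_word word (v2_sequence_from_parity_word word)

-- ===== LEMMAS AND PROOFS =====

theorem pvStepA_ne_pend (seq : List Int) (z : Int) {ch : Char} (h : ch ≠ '1') :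
    pvStepA (seq, true, z) ch = (seq, true, z + 1) := by
  simp [pvStepA, h]

theorem pvStepA_ne_start {ch : Char} (h : ch ≠ '1') :
    pvStepA ([], false, 0) ch = ([], false, 0) := by
  simp [pvStepA, h]

-- PySem's splitOn with a one-char separator is Mathlib's List.splitOn
theorem pvGo_splitOn (c : Char) : ∀ (fuel : Nat) (l cur : List Char) (acc : List (List Char)),
    l.length < fuel →
    PySem.Chars.splitOn.go [c] fuel l cur acc
      = acc.reverse ++ (List.splitOn c l).modifyHead (fun seg => cur.reverse ++ seg) := by
  intro fuel
  induction fuel with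
  | zero => intro l cur acc h; omega
  | succ n ih =>
    intro l cur acc h
    cases l with
    | nil =>
      simp [PySem.Chars.splitOn.go, List.splitOn, List.splitOnP_nil]
    | cons ch rest =>
      by_cases hc : ch = c
      · subst hc
        rw [show PySem.Chars.splitOn.go [ch] (n+1) (ch :: rest) cur acc
              = PySem.Chars.splitOn.go [ch] n rest [] (cur.reverse :: acc) by
            simp [PySem.Chars.splitOn.go, List.isPrefixOf, List.drop_succ_cons, List.drop_zero]]
        rw [ih rest [] (cur.reverse :: acc) (by simpa using h)]
        have hne := List.splitOnP_ne_nil (fun x => x == ch) rest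
        cases hh : List.splitOnP (fun x => x == ch) rest with
        | nil => exact absurd hh hne
        | cons hseg t =>
          simp [List.splitOn, List.splitOnP_cons, hh]
      · have hc' : (c == ch) = false := by
          simp [Ne.symm hc]
        rw [show PySem.Chars.splitOn.go [c] (n+1) (ch :: rest) cur acc
              = PySem.Chars.splitOn.go [c] n rest (ch :: cur) acc by
            simp [PySem.Chars.splitOn.go, List.isPrefixOf, hc']]
        rw [ih rest (ch :: cur) acc (by simpa using h)]
        have hne := List.splitOnP_ne_nil (fun x => x == c) rest
        cases hh : List.splitOnP (fun x => x == c) rest with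
        | nil => exact absurd hh hne
        | cons hseg t =>
          simp [List.splitOn, List.splitOnP_cons, hh, hc]

theorem pvSplitOn_single (c : Char) (l : List Char) :
    PySem.Chars.splitOn l [c] = List.splitOn c l := by
  have hgo := pvGo_splitOn c (l.length + 1) l [] [] (by omega)
  have hne := List.splitOnP_ne_nil (fun x => x == c) l
  cases hh : List.splitOnP (fun x => x == c) l with
  | nil => exact absurd hh hne
  | cons hseg t =>
    simp only [PySem.Chars.splitOn]
    rw [hgo]
    simp [List.splitOn, hh]

-- the segment lengths of List.splitOn '1'
def pvLens (l : List Char) : List Int := (List.splitOn '1' l).map (fun seg => (seg.length : Int))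

theorem pvLens_ne_nil (l : List Char) : pvLens l ≠ [] := by
  have h := List.splitOnP_ne_nil (fun x => x == '1') l
  simpa [pvLens, List.splitOn] using h

-- A's loop from a pending state produces seq ++ the segment lengths with `zeros` added to the head
theorem pvPend : ∀ (l : List Char) (seq : List Int) (z : Int),
    pvFinishA (l.foldl pvStepA (seq, true, z))
      = seq ++ (pvLens l).modifyHead (fun x => z + x) := by
  intro l
  induction l with
  | nil =>
    intro seq z
    simp [pvFinishA, pvLens, List.splitOn, List.splitOnP_nil]
  | cons ch rest ih =>
    intro seq z
    by_cases hc : ch = '1'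
    · subst hc
      rw [List.foldl_cons, show pvStepA (seq, true, z) '1' = (seq ++ [z], true, 0) from by
        simp [pvStepA]]
      rw [ih (seq ++ [z]) 0]
      have hne := pvLens_ne_nil rest
      cases hh : pvLens rest with
      | nil => exact absurd hh hne
      | cons h t =>
        simp [pvLens, List.splitOn, List.splitOnP_cons] at hh ⊢
        simp [hh]
    · rw [List.foldl_cons, pvStepA_ne_pend seq z hc, ih seq (z + 1)]
      have hsp := List.splitOnP_ne_nil (fun x => x == '1') rest
      cases hs : List.splitOnP (fun x => x == '1') rest with
      | nil => exact absurd hs hsp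
      | cons hs0 ts =>
        simp [pvLens, List.splitOn, List.splitOnP_cons, hc, hs]
        omega

-- A's whole loop from the initial state produces the segment lengths minus the first segment
theorem pvStart : ∀ (l : List Char),
    pvFinishA (l.foldl pvStepA ([], false, 0)) = (pvLens l).drop 1 := by
  intro l
  induction l with
  | nil => simp [pvFinishA, pvLens, List.splitOn, List.splitOnP_nil]
  | cons ch rest ih =>
    by_cases hc : ch = '1'
    · subst hc
      rw [List.foldl_cons, show pvStepA ([], false, 0) '1' = ([], true, 0) from by
        simp [pvStepA]]
      rw [pvPend rest [] 0]
      have hne := pvLens_ne_nil rest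
      cases hh : pvLens rest with
      | nil => exact absurd hh hne
      | cons h t =>
        simp [pvLens, List.splitOn, List.splitOnP_cons] at hh ⊢
        simp [hh]
    · rw [List.foldl_cons, pvStepA_ne_start hc, ih]
      have hsp := List.splitOnP_ne_nil (fun x => x == '1') rest
      cases hs : List.splitOnP (fun x => x == '1') rest with
      | nil => exact absurd hs hsp
      | cons hs0 ts =>
        simp [pvLens, List.splitOn, List.splitOnP_cons, hc, hs]

-- ===== VERDICT (by name: the statement is the Claim_ definition above) =====
theorem v2_sequence_from_parity_word_spec : Claim_equal_v2_sequence_from_parity_word := by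
  intro word _
  unfold Spec_v2_sequence_from_parity_word v2_sequence_from_parity_word v2_sequence_from_parity_word_alt
  rw [pvSplitOn_single, List.map_drop, pvStart word.toList, pvLens]
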